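-- pv_equiv track=rewrite | github.com/cossettealexis/dtce-ai-bot | search_precast_projects_corrected.py | extract_base_project_url
-- ===== SOURCE A (Python) =====
-- def extract_base_project_url(url: str, project_num: str) -> str:
--     """Extract base project folder URL for navigation."""
--     if not url or not project_num:
--         return ""
--
--     # Try to extract up to the project folder level
--     try:
--         parts = url.split('/')
--         for i, part in enumerate(parts):
--             if project_num in part:
--                 # Return URL up to this project folder
--                 return '/'.join(parts[:i+1])
--     except:
--         pass
--
--     return url
-- ===== SOURCE B (Python) =====
-- def extract_base_project_url(url: str, project_num: str) -> str:
--     """Extract base project folder URL for navigation."""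
--     if not url or not project_num:
--         return ""
--     # A project number containing '/' can never sit inside a single path segment.
--     if '/' in project_num:
--         return url
--     pos = url.find(project_num)
--     if pos == -1:
--         return url
--     nxt = url.find('/', pos + len(project_num))
--     return url if nxt == -1 else url[:nxt]
-- ===== Notes on version B (the rewrite author's own statement) =====
-- stated objective: idiomatic
-- what changed: B drops the split/enumerate/join over a materialized list of path segments and works on the raw string: one substring find, one find of the next '/' after the match, and a slice (with an early 'project_num contains a slash' exit, since such a string can never sit inside one segment).
import Mathlib
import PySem

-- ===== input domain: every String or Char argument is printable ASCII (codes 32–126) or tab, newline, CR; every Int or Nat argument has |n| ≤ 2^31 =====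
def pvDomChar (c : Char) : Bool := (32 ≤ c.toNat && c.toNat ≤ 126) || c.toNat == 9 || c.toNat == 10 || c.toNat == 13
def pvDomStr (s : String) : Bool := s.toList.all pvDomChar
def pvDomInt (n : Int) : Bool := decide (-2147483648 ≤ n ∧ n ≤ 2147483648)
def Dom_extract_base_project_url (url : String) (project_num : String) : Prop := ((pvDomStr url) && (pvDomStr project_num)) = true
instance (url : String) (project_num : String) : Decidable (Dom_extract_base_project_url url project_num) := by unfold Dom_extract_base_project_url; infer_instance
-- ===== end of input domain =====

-- B replaces A's split/enumerate/join over a list of path segments by direct string scans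
-- (find the substring, find the next '/', slice); equality of return values is proved below.

-- ===== PORT A =====
-- the 'for i, part in enumerate(parts): if project_num in part: return "/".join(parts[:i+1])' loop
def pvLoopA (url : String) (project_num : String) (parts : List String) :
    List (Int × String) → String
  | [] => url
  | (i, part) :: rest =>
      if PySem.Str.isIn project_num part then
        PySem.Str.join "/" (PySem.List.slice parts none (some (i + 1)))
      else pvLoopA url project_num parts rest

def extract_base_project_url (url : String) (project_num : String) : String :=
  if url = "" ∨ project_num = "" then ""
  else
    match PySem.Str.split? url "/" with
    | none => url  -- the 'except: pass' path; unreachable since "/" is nonempty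
    | some parts => pvLoopA url project_num parts (PySem.List.enumerate parts 0)

-- ===== PORT B =====
def extract_base_project_url_alt (url : String) (project_num : String) : String :=
  if url = "" ∨ project_num = "" then ""
  else if PySem.Str.isIn "/" project_num then url
  else
    let pos := PySem.Str.find url project_num
    if pos = -1 then url
    else
      let nxt := PySem.Str.findFrom url "/" (pos + PySem.Str.len project_num) none
      if nxt = -1 then url else PySem.Str.slice url none (some nxt)

-- ===== PRECONDITION & SPEC =====
def Spec_extract_base_project_url (url : String) (project_num : String) (out : String) : Prop := out = extract_base_project_url_alt url project_num
instance (url : String) (project_num : String) (out : String) : Decidable (Spec_extract_base_project_url url project_num out) := by unfold Spec_extract_base_project_url; infer_instance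

-- ===== CLAIM (what is proved, stated in full; the proofs are below) =====
def Claim_equal_extract_base_project_url : Prop := ∀ (url : String) (project_num : String), Dom_extract_base_project_url url project_num → Spec_extract_base_project_url url project_num (extract_base_project_url url project_num)

-- ===== LEMMAS AND PROOFS =====

-- A's loop at the List-Char level: pref holds the segments already passed over.
def pvALoop (p whole : List Char) : List (List Char) → List (List Char) → List Char
  | [], _pref => whole
  | part :: rest, pref =>
      if PySem.Chars.isIn p part then List.intercalate ['/'] (pref ++ [part])
      else pvALoop p whole rest (pref ++ [part])

-- B's core at the List-Char level.
def pvBCore (s p : List Char) : List Char :=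
  if PySem.Chars.find s p = -1 then s
  else
    let n := (PySem.Chars.find s p).toNat + p.length
    if PySem.Chars.find (s.drop n) ['/'] = -1 then s
    else s.take (n + (PySem.Chars.find (s.drop n) ['/']).toNat)

-- find points at n when there is an occurrence at n and none before it
lemma pv_find_eq_first {s p : List Char} {n : Nat} (h1 : p <+: s.drop n)
    (h2 : ∀ i < n, ¬ p <+: s.drop i) : PySem.Chars.find s p = (n : Int) := by
  have hinf : p <:+: s := h1.isInfix.trans (List.drop_suffix n s).isInfix
  have hnn : 0 ≤ PySem.Chars.find s p := (PySem.Chars.find_nonneg_iff s p).mpr hinf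
  obtain ⟨hpre, hmin⟩ := PySem.Chars.find_spec hnn
  rcases lt_trichotomy (PySem.Chars.find s p).toNat n with h | h | h
  · exact absurd hpre (h2 _ h)
  · omega
  · exact absurd h1 (hmin n h)

-- singleton infix is membership
lemma pv_singleton_infix_iff (a : Char) (l : List Char) : [a] <:+: l ↔ a ∈ l := by
  constructor
  · rintro ⟨u, v, rfl⟩; simp
  · intro h
    obtain ⟨u, v, rfl⟩ := List.append_of_mem h
    exact ⟨u, v, by simp⟩

-- splitOn of a slash-free string
lemma pv_splitOn_no_slash {s : List Char} (h : '/' ∉ s) : s.splitOn '/' = [s] := by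
  induction s with
  | nil => rfl
  | cons c t ih =>
    simp only [List.mem_cons, not_or] at h
    have hc : ¬ (c == '/') = true := by simp; intro e; exact h.1 e.symm
    simp only [List.splitOn, List.splitOnP_cons, if_neg hc]
    have := ih h.2
    simp only [List.splitOn] at this
    rw [this]; rfl

-- splitOn peels the first segment
lemma pv_splitOn_first {seg : List Char} (h : '/' ∉ seg) (rest : List Char) :
    (seg ++ '/' :: rest).splitOn '/' = seg :: rest.splitOn '/' := by
  induction seg with
  | nil => simp [List.splitOn, List.splitOnP_cons]
  | cons c t ih =>
    simp only [List.mem_cons, not_or] at h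
    have hc : ¬ (c == '/') = true := by simp; intro e; exact h.1 e.symm
    simp only [List.cons_append, List.splitOn, List.splitOnP_cons, if_neg hc]
    have := ih h.2
    simp only [List.splitOn] at this
    rw [this]; rfl

-- decompose a string at its first slash
lemma pv_first_slash {s : List Char} (hs : '/' ∈ s) :
    ∃ seg rest, s = seg ++ '/' :: rest ∧ '/' ∉ seg := by
  refine ⟨s.takeWhile (· ≠ '/'), (s.dropWhile (· ≠ '/')).tail, ?_, ?_⟩
  · have hne : s.dropWhile (· ≠ '/') ≠ [] := by
      intro h
      have := List.dropWhile_eq_nil_iff.mp h _ hs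
      simp at this
    have hhead : (s.dropWhile (· ≠ '/')).head hne = '/' := by
      have := List.head_dropWhile_not (· ≠ '/') hne
      simpa using this
    conv_lhs => rw [← List.takeWhile_append_dropWhile (p := (· ≠ '/')) (l := s)]
    congr 1
    conv_lhs => rw [← List.cons_head_tail hne]
    rw [hhead]
  · intro h
    have := List.mem_takeWhile_imp h
    simp at this

-- every segment produced by splitOn '/' is slash-free
lemma pv_splitOn_parts_no_slash (s : List Char) : ∀ x ∈ s.splitOn '/', '/' ∉ x := by
  induction hn : s.length using Nat.strong_induction_on generalizing s with
  | _ n ih =>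
    by_cases hs : '/' ∈ s
    · obtain ⟨seg, rest, rfl, hseg⟩ := pv_first_slash hs
      rw [pv_splitOn_first hseg]
      intro x hx
      rcases List.mem_cons.mp hx with rfl | hx
      · exact hseg
      · exact ih rest.length (by subst hn; simp; omega) rest rfl x hx
    · rw [pv_splitOn_no_slash hs]
      intro x hx
      simp at hx; subst hx; exact hs

-- PySem's fuel-based splitOn on the one-char separator is Mathlib's List.splitOn
lemma pv_splitOn_go (fuel : Nat) : ∀ (l cur : List Char) (acc : List (List Char)), l.length ≤ fuel →
    PySem.Chars.splitOn.go ['/'] fuel l cur acc =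
      acc.reverse ++ (l.splitOn '/').modifyHead (cur.reverse ++ ·) := by
  induction fuel with
  | zero =>
    intro l cur acc hl
    have : l = [] := List.eq_nil_of_length_eq_zero (by omega)
    subst this
    simp [PySem.Chars.splitOn.go, List.splitOn]
  | succ fuel ih =>
    intro l cur acc hl
    match l with
    | [] => simp [PySem.Chars.splitOn.go, List.splitOn]
    | c :: rest =>
      by_cases hc : c = '/'
      · subst hc
        rw [show PySem.Chars.splitOn.go ['/'] (fuel+1) ('/' :: rest) cur acc =
            PySem.Chars.splitOn.go ['/'] fuel rest [] (cur.reverse :: acc) by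
          simp [PySem.Chars.splitOn.go, List.isPrefixOf]]
        rw [ih rest [] (cur.reverse :: acc) (by simp at hl ⊢; omega)]
        simp only [List.splitOn, List.splitOnP_cons]
        simp only [show ('/' == '/') = true by simp, if_pos]
        cases List.splitOnP (fun x => x == '/') rest <;> simp
      · rw [show PySem.Chars.splitOn.go ['/'] (fuel+1) (c :: rest) cur acc =
            PySem.Chars.splitOn.go ['/'] fuel rest (c :: cur) acc by
          simp [PySem.Chars.splitOn.go, List.isPrefixOf]
          intro e; exact absurd e.symm hc]
        rw [ih rest (c :: cur) acc (by simp at hl ⊢; omega)]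
        have hne := List.splitOnP_ne_nil (fun x => x == '/') rest
        simp only [List.splitOn, List.splitOnP_cons, show (c == '/') = false by simp [hc]]
        match h : List.splitOnP (fun x => x == '/') rest with
        | [] => exact absurd h hne
        | a :: as => simp [List.modifyHead]

lemma pv_chars_splitOn_eq (s : List Char) :
    PySem.Chars.splitOn s ['/'] = s.splitOn '/' := by
  rw [PySem.Chars.splitOn, pv_splitOn_go _ _ _ _ (by omega)]
  have hne := List.splitOnP_ne_nil (fun x => x == '/') s
  simp only [List.splitOn] at *
  match h : List.splitOnP (fun x => x == '/') s with
  | [] => exact absurd h hne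
  | a :: as => simp [List.modifyHead]

-- an occurrence of a slash-free p in seg ++ '/' :: rest lies inside seg or inside rest
lemma pv_occ_confine {p seg rest : List Char} (hp : p ≠ []) (hps : '/' ∉ p)
    {j : Nat} (h : p <+: (seg ++ '/' :: rest).drop j) :
    (j + p.length ≤ seg.length ∧ p <:+: seg) ∨
    (seg.length + 1 ≤ j ∧ p <+: rest.drop (j - (seg.length + 1))) := by
  rcases lt_trichotomy j seg.length with hj | hj | hj
  · left
    have hdrop : (seg ++ '/' :: rest).drop j = seg.drop j ++ '/' :: rest := by
      rw [List.drop_append_of_le_length (by omega)]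
    rw [hdrop] at h
    by_cases hlen : p.length ≤ seg.length - j
    · have hpre : p <+: seg.drop j := by
        have := List.prefix_iff_eq_take.mp h
        rw [List.take_append_of_le_length (by simp; omega)] at this
        exact List.prefix_iff_eq_take.mpr (by simpa using this)
      constructor
      · have := hpre.length_le; simp at this; omega
      · exact hpre.isInfix.trans (List.drop_suffix j seg).isInfix
    · exfalso
      have hlen2 : seg.length - j < p.length := by omega
      have heq := List.prefix_iff_eq_take.mp h
      have hsl : '/' ∈ p := by
        rw [heq]
        have hidx : ((seg.drop j ++ '/' :: rest).take p.length)[seg.length - j]? = some '/' := by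
          rw [List.getElem?_take_of_lt hlen2]
          rw [List.getElem?_append_right (by simp)]
          simp
        exact List.mem_of_getElem? hidx
      exact hps hsl
  · exfalso
    subst hj
    rw [List.drop_append_of_le_length le_rfl, List.drop_length, List.nil_append] at h
    match p, hp with
    | c :: p', _ =>
      have := (List.cons_prefix_cons.mp h).1
      exact hps (by simp [this])
  · right
    refine ⟨by omega, ?_⟩
    have : (seg ++ '/' :: rest).drop j = rest.drop (j - (seg.length + 1)) := by
      rw [List.drop_append, List.drop_of_length_le (by omega), List.nil_append,
        show j - seg.length = (j - seg.length - 1) + 1 by omega, List.drop_succ_cons]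
      congr 1
    rwa [this] at h

lemma pv_find_no_slash {a : List Char} (h : '/' ∉ a) :
    PySem.Chars.find a ['/'] = -1 := by
  rw [PySem.Chars.find_eq_neg_one_iff]
  intro hinf
  rcases hinf with ⟨u, v, rfl⟩
  exact h (by simp)

lemma pv_find_slash {a : List Char} (h : '/' ∉ a) (r : List Char) :
    PySem.Chars.find (a ++ '/' :: r) ['/'] = (a.length : Int) := by
  apply pv_find_eq_first
  · rw [List.drop_append_of_le_length le_rfl, List.drop_length, List.nil_append]
    exact ⟨r, rfl⟩
  · intro i hi hpre
    rw [List.drop_append_of_le_length (by omega)] at hpre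
    have hne : a.drop i ≠ [] := by simp; omega
    match hd : a.drop i, hne with
    | c :: t, _ =>
      rw [hd] at hpre
      have hcEq : '/' = c := (List.cons_prefix_cons.mp hpre).1
      have hc : c ∈ a := List.mem_of_mem_drop (by rw [hd]; simp : c ∈ a.drop i)
      exact h (hcEq ▸ hc)

lemma pv_drop_big (seg rest : List Char) (k : Nat) :
    (seg ++ '/' :: rest).drop (seg.length + 1 + k) = rest.drop k := by
  rw [List.drop_append, List.drop_of_length_le (by omega), List.nil_append,
    show seg.length + 1 + k - seg.length = k + 1 by omega, List.drop_succ_cons]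

lemma pv_take_big (seg rest : List Char) (k : Nat) :
    (seg ++ '/' :: rest).take (seg.length + 1 + k) = seg ++ '/' :: rest.take k := by
  rw [show seg.length + 1 + k = seg.length + (k + 1) by omega, List.take_append,
    List.take_of_length_le (by omega), show seg.length + (k + 1) - seg.length = k + 1 by omega,
    List.take_succ_cons]

-- B's core peels a non-matching first segment
lemma pv_BCore_cons_seg {p seg rest : List Char} (hp : p ≠ []) (hps : '/' ∉ p)
    (hm : ¬ p <:+: seg) :
    pvBCore (seg ++ '/' :: rest) p = seg ++ '/' :: pvBCore rest p := by
  by_cases hr : PySem.Chars.find rest p = -1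
  · have hs : PySem.Chars.find (seg ++ '/' :: rest) p = -1 := by
      rw [PySem.Chars.find_eq_neg_one_iff]
      intro hinf
      obtain ⟨j, hj⟩ := (PySem.Chars.exists_prefix_drop_iff_isIn p _).mpr
        ((PySem.Chars.isIn_iff_infix p _).mpr hinf)
      rcases pv_occ_confine hp hps hj with ⟨_, h2⟩ | ⟨_, h2⟩
      · exact hm h2
      · exact (PySem.Chars.find_eq_neg_one_iff rest p).mp hr
          (h2.isInfix.trans (List.drop_suffix _ rest).isInfix)
    rw [pvBCore, if_pos hs, pvBCore, if_pos hr]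
  · have hnnr : 0 ≤ PySem.Chars.find rest p := by
      have := PySem.Chars.neg_one_le_find rest p; omega
    set m : Nat := (PySem.Chars.find rest p).toNat with hm_def
    obtain ⟨hpre_r, hmin_r⟩ := PySem.Chars.find_spec hnnr
    have hfs : PySem.Chars.find (seg ++ '/' :: rest) p = ((seg.length + 1 + m : Nat) : Int) := by
      apply pv_find_eq_first
      · rw [pv_drop_big]; exact hpre_r
      · intro i hi hpre
        rcases pv_occ_confine hp hps hpre with ⟨_, h2⟩ | ⟨hge, h2⟩
        · exact hm h2
        · exact hmin_r (i - (seg.length + 1)) (by omega) h2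
    have hs_ne : PySem.Chars.find (seg ++ '/' :: rest) p ≠ -1 := by rw [hfs]; omega
    rw [pvBCore, if_neg hs_ne, pvBCore, if_neg hr]
    simp only [hfs]
    rw [show ((seg.length + 1 + m : Nat) : Int).toNat + p.length = seg.length + 1 + (m + p.length) by omega]
    rw [pv_drop_big]
    by_cases hsl : PySem.Chars.find (rest.drop (m + p.length)) ['/'] = -1
    · rw [if_pos hsl, if_pos hsl]
    · rw [if_neg hsl, if_neg hsl]
      rw [show seg.length + 1 + (m + p.length) + (PySem.Chars.find (rest.drop (m + p.length)) ['/']).toNat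
          = seg.length + 1 + (m + p.length + (PySem.Chars.find (rest.drop (m + p.length)) ['/']).toNat) by omega]
      rw [pv_take_big]

lemma pv_intercalate_cons {s : List Char} {L : List (List Char)} (hL : L ≠ []) :
    List.intercalate ['/'] (s :: L) = s ++ '/' :: List.intercalate ['/'] L := by
  induction L with
  | nil => simp at hL
  | cons a as _ => simp [List.intercalate, List.intersperse]

-- a loop that never matches returns the whole url
lemma pvALoop_no_match {p whole : List Char} {parts : List (List Char)}
    (h : ∀ part ∈ parts, PySem.Chars.isIn p part = false) :
    ∀ pref, pvALoop p whole parts pref = whole := by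
  induction parts with
  | nil => intro pref; rfl
  | cons part rest ih =>
    intro pref
    rw [pvALoop, if_neg (by simp [h part (by simp)])]
    exact ih (fun x hx => h x (by simp [hx])) _

-- pushing a passed segment out of the loop
lemma pvALoop_cons_seg {p seg W : List Char} (parts : List (List Char)) :
    ∀ pref, pvALoop p (seg ++ '/' :: W) parts (seg :: pref) =
      seg ++ '/' :: pvALoop p W parts pref := by
  induction parts with
  | nil => intro pref; rfl
  | cons part rest ih =>
    intro pref
    rw [pvALoop, pvALoop]
    by_cases hm : PySem.Chars.isIn p part
    · rw [if_pos hm, if_pos hm]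
      rw [show seg :: pref ++ [part] = seg :: (pref ++ [part]) by simp]
      rw [pv_intercalate_cons (by simp)]
    · rw [if_neg hm, if_neg hm, show seg :: pref ++ [part] = seg :: (pref ++ [part]) by simp, ih]

-- the central equivalence at the List-Char level
lemma pv_core_eq (s p : List Char) (hp : p ≠ []) (hps : '/' ∉ p) :
    pvALoop p s (s.splitOn '/') [] = pvBCore s p := by
  induction hn : s.length using Nat.strong_induction_on generalizing s with
  | _ n ih =>
  by_cases hs : '/' ∈ s
  · obtain ⟨seg, rest, rfl, hseg⟩ := pv_first_slash hs
    rw [pv_splitOn_first hseg, pvALoop]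
    by_cases hmm : PySem.Chars.isIn p seg
    · rw [if_pos hmm]
      have hocc_seg : p <:+: seg := (PySem.Chars.isIn_iff_infix p seg).mp hmm
      rw [List.nil_append, show List.intercalate ['/'] [seg] = seg by simp [List.intercalate]]
      have hinf_s : p <:+: (seg ++ '/' :: rest) := by
        obtain ⟨u, v, huv⟩ := hocc_seg
        exact ⟨u, v ++ '/' :: rest, by rw [← huv]; simp⟩
      have hnn : 0 ≤ PySem.Chars.find (seg ++ '/' :: rest) p :=
        (PySem.Chars.find_nonneg_iff _ p).mpr hinf_s
      obtain ⟨hpre, hmin⟩ := PySem.Chars.find_spec hnn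
      set n0 : Nat := (PySem.Chars.find (seg ++ '/' :: rest) p).toNat with hn0
      have hconf : n0 + p.length ≤ seg.length := by
        rcases pv_occ_confine hp hps hpre with ⟨h1, _⟩ | ⟨hge, _⟩
        · exact h1
        · exfalso
          obtain ⟨j, hj⟩ := (PySem.Chars.exists_prefix_drop_iff_isIn p seg).mpr hmm
          have hjlt : j < seg.length := by
            have hne : seg.drop j ≠ [] := by
              intro hd; rw [hd] at hj; exact hp (List.prefix_nil.mp hj)
            simp at hne; omega
          have hj' : p <+: (seg ++ '/' :: rest).drop j := by
            rw [List.drop_append_of_le_length (by omega)]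
            exact hj.trans (List.prefix_append _ _)
          exact hmin j (by omega) hj'
      rw [pvBCore, if_neg (by omega)]
      simp only
      have hdrop : (seg ++ '/' :: rest).drop (n0 + p.length)
          = seg.drop (n0 + p.length) ++ '/' :: rest := by
        rw [List.drop_append_of_le_length (by omega)]
      rw [hdrop]
      have hnos : '/' ∉ seg.drop (n0 + p.length) := fun hx => hseg (List.mem_of_mem_drop hx)
      rw [pv_find_slash hnos]
      rw [if_neg (by simp)]
      rw [show n0 + p.length + (((seg.drop (n0 + p.length)).length : Int)).toNat = seg.length by
        simp; omega]
      rw [List.take_append, List.take_of_length_le le_rfl, Nat.sub_self, List.take_zero,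
        List.append_nil]
    · rw [if_neg hmm, List.nil_append]
      rw [show [seg] = seg :: ([] : List (List Char)) by rfl, pvALoop_cons_seg]
      rw [ih rest.length (by subst hn; simp; omega) rest rfl]
      rw [pv_BCore_cons_seg hp hps (by rwa [PySem.Chars.isIn_iff_infix p seg] at hmm)]
  · rw [pv_splitOn_no_slash hs, pvALoop]
    by_cases hmm : PySem.Chars.isIn p s
    · rw [if_pos hmm, List.nil_append, show List.intercalate ['/'] [s] = s by simp [List.intercalate]]
      have hnn : 0 ≤ PySem.Chars.find s p :=
        (PySem.Chars.find_nonneg_iff s p).mpr ((PySem.Chars.isIn_iff_infix p s).mp hmm)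
      rw [pvBCore, if_neg (by omega)]
      simp only
      have : '/' ∉ s.drop ((PySem.Chars.find s p).toNat + p.length) :=
        fun hx => hs (List.mem_of_mem_drop hx)
      rw [pv_find_no_slash this, if_pos rfl]
    · rw [if_neg hmm, pvALoop, pvBCore,
        if_pos ((PySem.Chars.find_eq_neg_one_iff s p).mpr
          (by rwa [PySem.Chars.isIn_iff_infix p s] at hmm))]

-- bridge: A's string-level loop is pvALoop
lemma pv_loopA_eq (url project_num : String) (parts : List String) :
    ∀ (rest : List String) (k : Nat), parts.drop k = rest →
      (pvLoopA url project_num parts (PySem.List.enumerate rest (k : Int))).toList =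
        pvALoop project_num.toList url.toList (rest.map String.toList)
          ((parts.take k).map String.toList) := by
  intro rest
  induction rest with
  | nil =>
    intro k hk
    simp [PySem.List.enumerate, pvLoopA, pvALoop]
  | cons part rest' ih =>
    intro k hk
    rw [PySem.List.enumerate_cons, pvLoopA]
    have hget : parts[k]? = some part := by
      have h0 : (parts.drop k)[0]? = some part := by rw [hk]; rfl
      rw [List.getElem?_drop] at h0
      simpa using h0
    have htake : parts.take (k+1) = parts.take k ++ [part] := by
      rw [List.take_add_one, hget]
      rfl
    have hcond : PySem.Str.isIn project_num part
        = PySem.Chars.isIn project_num.toList part.toList := PySem.Str.isIn_eq _ _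
    rw [List.map_cons, pvALoop, ← hcond]
    by_cases hmatch : PySem.Str.isIn project_num part
    · rw [if_pos hmatch, if_pos hmatch]
      rw [show ((k : Int) + 1) = ((k + 1 : Nat) : Int) by push_cast; ring]
      rw [PySem.List.slice_to_natCast, htake, PySem.Str.toList_join]
      simp [PySem.Chars.join]
    · rw [if_neg hmatch, if_neg hmatch]
      have hdrop' : parts.drop (k+1) = rest' := by
        rw [← List.drop_drop, hk]
        rfl
      have := ih (k+1) hdrop'
      rw [show ((k : Int) + 1) = ((k + 1 : Nat) : Int) by push_cast; ring]
      rw [this, htake]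
      simp

-- B's port computes pvBCore (on toList) once both guards have fallen through
lemma pv_alt_toList (url project_num : String) (hg : ¬ (url = "" ∨ project_num = ""))
    (hsl : PySem.Str.isIn "/" project_num = false) :
    (extract_base_project_url_alt url project_num).toList = pvBCore url.toList project_num.toList := by
  rw [extract_base_project_url_alt, if_neg hg]
  rw [hsl]
  simp only [Bool.false_eq_true, if_false]
  rw [PySem.Str.find_eq]
  by_cases hfind : PySem.Chars.find url.toList project_num.toList = -1
  · rw [if_pos hfind, pvBCore, if_pos hfind]
  · simp only [if_neg hfind]
    rw [pvBCore, if_neg hfind]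
    have hnn : 0 ≤ PySem.Chars.find url.toList project_num.toList := by
      have := PySem.Chars.neg_one_le_find url.toList project_num.toList; omega
    set n0 : Nat := (PySem.Chars.find url.toList project_num.toList).toNat with hn0
    have hk : n0 + project_num.toList.length ≤ url.toList.length := by
      obtain ⟨hpre, _⟩ := PySem.Chars.find_spec hnn
      have h1 := hpre.length_le
      simp only [List.length_drop] at h1
      have h2 := PySem.Chars.find_le_length url.toList project_num.toList
      omega
    rw [PySem.Str.findFrom_eq, PySem.Str.len_eq,
      show PySem.Chars.find url.toList project_num.toList + (project_num.toList.length : Int)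
        = ((n0 + project_num.toList.length : Nat) : Int) by omega,
      PySem.Chars.findFrom_natCast _ _ _ hk]
    rw [show ("/" : String).toList = ['/'] from rfl]
    by_cases hsl2 : PySem.Chars.find (url.toList.drop (n0 + project_num.toList.length)) ['/'] = -1
    · rw [if_pos hsl2, if_pos hsl2, if_pos rfl]
    · rw [if_neg hsl2, if_neg hsl2]
      have hj : 0 ≤ PySem.Chars.find (url.toList.drop (n0 + project_num.toList.length)) ['/'] := by
        have := PySem.Chars.neg_one_le_find (url.toList.drop (n0 + project_num.toList.length)) ['/']
        omega
      rw [if_neg (by omega)]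
      rw [PySem.Str.toList_slice]
      rw [show ((n0 + project_num.toList.length : Nat) : Int)
            + PySem.Chars.find (url.toList.drop (n0 + project_num.toList.length)) ['/']
          = ((n0 + project_num.toList.length
              + (PySem.Chars.find (url.toList.drop (n0 + project_num.toList.length)) ['/']).toNat : Nat) : Int) by omega]
      simp only [PySem.Chars.slice_eq_listSlice]
      rw [PySem.List.slice_to_natCast]

-- A's port computes pvALoop over the Mathlib splitOn once the guard has fallen through
lemma pv_a_toList (url project_num : String) (hg : ¬ (url = "" ∨ project_num = "")) :
    (extract_base_project_url url project_num).toList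
      = pvALoop project_num.toList url.toList (url.toList.splitOn '/') [] := by
  have hsplit : PySem.Str.split? url "/" =
      some ((url.toList.splitOn '/').map String.ofList) := by
    simp only [PySem.Str.split?, PySem.Chars.split?]
    rw [show ("/" : String).toList = ['/'] from rfl]
    simp [pv_chars_splitOn_eq]
  rw [extract_base_project_url, if_neg hg, hsplit]
  simp only
  have h0 := pv_loopA_eq url project_num ((url.toList.splitOn '/').map String.ofList)
    ((url.toList.splitOn '/').map String.ofList) 0 rfl
  simp only [Nat.cast_zero, List.take_zero, List.map_nil] at h0
  rw [h0]
  congr 1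
  rw [List.map_map]
  simp [Function.comp_def]

-- ===== VERDICT (by name: the statement is the Claim_ definition above) =====
theorem extract_base_project_url_spec : Claim_equal_extract_base_project_url := by
  unfold Claim_equal_extract_base_project_url
  intro url project_num _dom
  unfold Spec_extract_base_project_url
  by_cases hg : url = "" ∨ project_num = ""
  · rw [extract_base_project_url, if_pos hg, extract_base_project_url_alt, if_pos hg]
  · apply String.toList_inj.mp
    rw [pv_a_toList url project_num hg]
    by_cases hsl : PySem.Str.isIn "/" project_num
    · -- project_num contains a slash: no segment can match; both sides are url
      rw [extract_base_project_url_alt, if_neg hg, if_pos hsl]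
      apply pvALoop_no_match
      intro part hpart
      by_contra hbad
      simp only [Bool.not_eq_false] at hbad
      have hinf := (PySem.Chars.isIn_iff_infix _ _).mp hbad
      have hslp : '/' ∈ project_num.toList := by
        have := (PySem.Chars.isIn_iff_infix _ _).mp hsl
        rw [show ("/" : String).toList = ['/'] from rfl] at this
        exact (pv_singleton_infix_iff _ _).mp this
      have : '/' ∈ part := List.IsInfix.mem hslp hinf
      exact pv_splitOn_parts_no_slash url.toList part hpart this
    · rw [pv_alt_toList url project_num hg (by simpa using hsl)]
      apply pv_core_eq
      · intro h
        exact (by tauto : project_num ≠ "") (String.toList_eq_nil_iff.mp h)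
      · intro h
        have : PySem.Chars.isIn ("/" : String).toList project_num.toList = true := by
          rw [show ("/" : String).toList = ['/'] from rfl, PySem.Chars.isIn_iff_infix]
          exact (pv_singleton_infix_iff _ _).mpr h
        exact hsl (by rw [PySem.Str.isIn_eq]; exact this)
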